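-- pv_equiv track=rewrite | github.com/miliar/Code_Jam_Webscraper | Solutions_python/Problem_178/3180.py | compute_min_flips
-- ===== SOURCE A (Python) =====
-- def compute_min_flips(stack_specification):
--     """
--     Args:
--         stack_specification (str): String containing '+' and '-'
--
--     Returns:
--         Number of flips necessary to turn all the -s into +s.
--
--     >>> compute_min_flips('-')
--     1
--     >>> compute_min_flips('-+')
--     1
--     >>> compute_min_flips('+-')
--     2
--     >>> compute_min_flips('+++')
--     0
--     >>> compute_min_flips('--+-')
--     3
--     """
--     if len(stack_specification) == 0: return 0
--     # Starting from the top, keep going down until you encounter a pancake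
--     # facing a direction differently from the top 1. Flip the current stack.
--     # Repeat.
--     num_flips = 0
--     top_pancake_orientation = stack_specification[0]
--     for pancake_orientation in stack_specification[1:]:
--         if pancake_orientation != top_pancake_orientation:
--             num_flips += 1
--             top_pancake_orientation = pancake_orientation
--     if top_pancake_orientation != '+':
--         num_flips += 1
--     return num_flips
-- ===== SOURCE B (Python) =====
-- def compute_min_flips(stack_specification):
--     s = stack_specification
--     if not s:
--         return 0
--
--     def trans(lo, hi):
--         # adjacent mismatches among pairs (i-1, i) with lo < i < hi, by divide and conquer
--         if hi - lo <= 1: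
--             return 0
--         mid = (lo + hi) // 2
--         return trans(lo, mid) + trans(mid, hi) + (s[mid - 1] != s[mid])
--
--     return trans(0, len(s)) + (s[-1] != '+')
-- ===== Notes on version B (the rewrite author's own statement) =====
-- stated objective: alternative
-- what changed: Replaces A's left-to-right stateful loop (carrying a running top orientation) with a divide-and-conquer recursion over index intervals that counts adjacent mismatches by splitting the interval in half, plus a final-character adjustment.
import Mathlib
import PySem

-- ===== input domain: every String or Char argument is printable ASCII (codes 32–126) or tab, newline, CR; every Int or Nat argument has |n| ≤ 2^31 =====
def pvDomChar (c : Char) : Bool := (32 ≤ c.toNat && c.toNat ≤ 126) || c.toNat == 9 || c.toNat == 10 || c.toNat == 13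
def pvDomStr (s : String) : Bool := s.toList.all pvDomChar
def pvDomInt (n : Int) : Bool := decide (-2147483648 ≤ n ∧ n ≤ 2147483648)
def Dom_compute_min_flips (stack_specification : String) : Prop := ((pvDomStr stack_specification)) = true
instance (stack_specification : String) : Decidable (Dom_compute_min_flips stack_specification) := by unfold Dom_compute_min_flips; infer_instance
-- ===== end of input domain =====

-- B replaces A's left-to-right stateful loop with a divide-and-conquer recursion over
-- index intervals counting adjacent mismatches, plus a final-character adjustment; same cost, alternative algorithm.


-- ===== PORT A =====
-- A's for-loop over stack_specification[1:], carrying (num_flips, top_pancake_orientation)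
def compute_min_flips_loop (st : Int × Char) (c : Char) : Int × Char :=
  if c ≠ st.2 then (st.1 + 1, c) else st

def compute_min_flips_list : List Char → Int
  | [] => 0
  | top :: rest =>
    let r := rest.foldl compute_min_flips_loop (0, top)
    if r.2 ≠ '+' then r.1 + 1 else r.1

def compute_min_flips (stack_specification : String) : Int :=
  compute_min_flips_list stack_specification.toList

-- ===== PORT B =====
-- B's nested `trans(lo, hi)`: divide-and-conquer count of adjacent mismatches (i-1, i), lo < i < hi
def compute_min_flips_trans (s : List Char) (lo hi : Nat) : Int :=
  if hi - lo ≤ 1 then 0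
  else
    let mid := (lo + hi) / 2
    compute_min_flips_trans s lo mid + compute_min_flips_trans s mid hi +
      (if s[mid - 1]? ≠ s[mid]? then 1 else 0)
termination_by hi - lo
decreasing_by all_goals omega

def compute_min_flips_alt (stack_specification : String) : Int :=
  let s := stack_specification.toList
  if s = [] then 0
  else compute_min_flips_trans s 0 s.length + (if s.getLast? ≠ some '+' then 1 else 0)

-- ===== PRECONDITION & SPEC =====
def Spec_compute_min_flips (stack_specification : String) (out : Int) : Prop := out = compute_min_flips_alt stack_specification
instance (stack_specification : String) (out : Int) : Decidable (Spec_compute_min_flips stack_specification out) := by unfold Spec_compute_min_flips; infer_instance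

-- ===== CLAIM (what is proved, stated in full; the proofs are below) =====
def Claim_equal_compute_min_flips : Prop := ∀ (stack_specification : String), Dom_compute_min_flips stack_specification → Spec_compute_min_flips stack_specification (compute_min_flips stack_specification)

-- ===== LEMMAS AND PROOFS =====

-- linear (right-peeling) count of adjacent mismatches (i-1, i) with lo < i < hi
def pcLin (s : List Char) (lo hi : Nat) : Int :=
  if hi ≤ lo + 1 then 0
  else pcLin s lo (hi - 1) + (if s[hi - 2]? ≠ s[hi - 1]? then 1 else 0)
termination_by hi
decreasing_by omega

-- structural (left-peeling) count of adjacent mismatches, matching A's loop shape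
def adjMism : List Char → Int
  | a :: b :: t => (if b ≠ a then 1 else 0) + adjMism (b :: t)
  | _ => 0

lemma pcLin_split (s : List Char) (lo mid hi : Nat) (h1 : lo + 1 ≤ mid) (h2 : mid + 1 ≤ hi) :
    pcLin s lo hi = pcLin s lo mid + pcLin s mid hi +
      (if s[mid - 1]? ≠ s[mid]? then 1 else 0) := by
  induction hi using Nat.strong_induction_on with
  | _ hi ih =>
    by_cases hb : hi = mid + 1
    · subst hb
      have e1 : pcLin s mid (mid + 1) = 0 := by rw [pcLin]; simp
      have e2 : pcLin s lo (mid + 1)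
          = pcLin s lo mid + (if s[mid - 1]? ≠ s[mid]? then 1 else 0) := by
        rw [pcLin, if_neg (by omega)]
        simp only [Nat.add_sub_cancel, show mid + 1 - 2 = mid - 1 from by omega]
      rw [e1, e2]; ring
    · have hgt : mid + 2 ≤ hi := by omega
      have e3 : pcLin s mid hi
          = pcLin s mid (hi - 1) + (if s[hi - 2]? ≠ s[hi - 1]? then 1 else 0) := by
        rw [pcLin, if_neg (by omega)]
      rw [pcLin, if_neg (by omega), ih (hi - 1) (by omega) (by omega), e3]
      ring

lemma trans_eq_pcLin_aux : ∀ (n : Nat) (s : List Char) (lo hi : Nat), hi - lo = n →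
    compute_min_flips_trans s lo hi = pcLin s lo hi := by
  intro n
  induction n using Nat.strong_induction_on with
  | _ n ih =>
    intro s lo hi hn
    rw [compute_min_flips_trans]
    by_cases h : hi - lo ≤ 1
    · rw [if_pos h, pcLin, if_pos (by omega)]
    · rw [if_neg h]
      show compute_min_flips_trans s lo ((lo + hi) / 2)
            + compute_min_flips_trans s ((lo + hi) / 2) hi
            + (if s[(lo + hi) / 2 - 1]? ≠ s[(lo + hi) / 2]? then 1 else 0)
          = pcLin s lo hi
      rw [ih ((lo + hi) / 2 - lo) (by omega) s lo ((lo + hi) / 2) rfl,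
          ih (hi - (lo + hi) / 2) (by omega) s ((lo + hi) / 2) hi rfl,
          pcLin_split s lo ((lo + hi) / 2) hi (by omega) (by omega)]

lemma trans_eq_pcLin (s : List Char) (lo hi : Nat) :
    compute_min_flips_trans s lo hi = pcLin s lo hi :=
  trans_eq_pcLin_aux (hi - lo) s lo hi rfl

lemma pcLin_shift : ∀ (hi : Nat) (c : Char) (s : List Char) (lo : Nat),
    pcLin (c :: s) (lo + 1) (hi + 1) = pcLin s lo hi := by
  intro hi
  induction hi using Nat.strong_induction_on with
  | _ hi ih =>
    intro c s lo
    by_cases h : hi ≤ lo + 1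
    · rw [pcLin, if_pos (by omega), pcLin, if_pos (by omega)]
    · have e : pcLin s lo hi
          = pcLin s lo (hi - 1) + (if s[hi - 2]? ≠ s[hi - 1]? then 1 else 0) := by
        rw [pcLin, if_neg (by omega)]
      rw [pcLin, if_neg (by omega)]
      simp only [show hi + 1 - 1 = (hi - 1) + 1 from by omega,
        show hi + 1 - 2 = (hi - 2) + 1 from by omega, List.getElem?_cons_succ]
      rw [ih (hi - 1) (by omega) c s lo, e]

lemma adj_eq_pcLin : ∀ (s : List Char), adjMism s = pcLin s 0 s.length := by
  intro s
  induction s with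
  | nil => rw [pcLin]; simp [adjMism]
  | cons a t ih =>
    cases t with
    | nil => rw [pcLin]; simp [adjMism]
    | cons b t =>
      have hsplit := pcLin_split (a :: b :: t) 0 1 (t.length + 2) (by omega) (by omega)
      have h01 : pcLin (a :: b :: t) 0 1 = 0 := by rw [pcLin]; simp
      have hshift : pcLin (a :: b :: t) 1 (t.length + 2) = pcLin (b :: t) 0 (t.length + 1) := by
        have := pcLin_shift (t.length + 1) a (b :: t) 0
        simpa using this
      simp only [List.length_cons]
      rw [hsplit, h01, hshift]
      have hL : pcLin (b :: t) 0 (t.length + 1) = adjMism (b :: t) := by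
        rw [ih]; simp
      rw [hL]
      simp only [adjMism]
      by_cases hab : a = b
      · subst hab; simp
      · rw [if_pos (fun hh : b = a => hab hh.symm), if_pos (by simp [hab])]
        ring

lemma loop_eq (rest : List Char) (top : Char) (nf : Int) :
    rest.foldl compute_min_flips_loop (nf, top)
      = (nf + adjMism (top :: rest), (top :: rest).getLast (by simp)) := by
  induction rest generalizing top nf with
  | nil => simp [adjMism]
  | cons b t ih =>
    simp only [List.foldl_cons, compute_min_flips_loop]
    by_cases h : b = top
    · subst h
      rw [if_neg (by simp), ih]
      simp [adjMism, List.getLast_cons]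
    · rw [if_pos (by simpa using h), ih]
      simp only [adjMism, Prod.mk.injEq]
      constructor
      · rw [if_pos h]; ring
      · rw [List.getLast_cons (by simp : (b :: t) ≠ [])]

-- ===== VERDICT (by name: the statement is the Claim_ definition above) =====
theorem compute_min_flips_spec : Claim_equal_compute_min_flips := by
  intro s _
  unfold Spec_compute_min_flips compute_min_flips compute_min_flips_alt
  cases hs : s.toList with
  | nil => simp [compute_min_flips_list]
  | cons top rest =>
    simp only [compute_min_flips_list]
    rw [loop_eq rest top 0]
    rw [if_neg (by simp : ¬ (top :: rest) = [])]
    rw [trans_eq_pcLin, ← adj_eq_pcLin]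
    have hlast : (top :: rest).getLast? = some ((top :: rest).getLast (by simp)) :=
      @List.getLast?_eq_some_getLast _ (top :: rest) (by simp)
    by_cases h : (top :: rest).getLast (by simp) = '+'
    · rw [if_neg (by simpa using h), if_neg (by rw [hlast, h]; simp)]
      ring
    · rw [if_pos (by simpa using h), if_pos (by rw [hlast]; simpa using h)]
      ring
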